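-- pv_equiv track=rewrite | github.com/yumorepos/autonomous-trading-system | scripts/supervisor-governance.py | detect_loss_streak
-- ===== SOURCE A (Python) =====
-- from typing import Dict, List, Tuple
--
-- def detect_loss_streak(trades: List[Dict]) -> int:
--     """Count current losing streak"""
--     streak = 0
--     for trade in reversed(trades):
--         if trade['pnl'] <= 0:
--             streak += 1
--         else:
--             break
--     return streak
-- ===== SOURCE B (Python) =====
-- def detect_loss_streak(trades):
--     """Count current losing streak"""
--     last_win = -1
--     for i, trade in enumerate(trades):
--         if trade['pnl'] > 0:
--             last_win = i
--     return len(trades) - 1 - last_win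
-- ===== Notes on version B (the rewrite author's own statement) =====
-- stated objective: alternative
-- what changed: Replaces the backward scan with accumulator and early break by a forward pass that records the index of the last winning trade and returns len(trades)-1-last_win arithmetically.
-- outside the precondition, e.g. on detect_loss_streak([{'a': 1}, {'pnl': 5}]): A returns 0, B raises KeyError
import Mathlib
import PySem

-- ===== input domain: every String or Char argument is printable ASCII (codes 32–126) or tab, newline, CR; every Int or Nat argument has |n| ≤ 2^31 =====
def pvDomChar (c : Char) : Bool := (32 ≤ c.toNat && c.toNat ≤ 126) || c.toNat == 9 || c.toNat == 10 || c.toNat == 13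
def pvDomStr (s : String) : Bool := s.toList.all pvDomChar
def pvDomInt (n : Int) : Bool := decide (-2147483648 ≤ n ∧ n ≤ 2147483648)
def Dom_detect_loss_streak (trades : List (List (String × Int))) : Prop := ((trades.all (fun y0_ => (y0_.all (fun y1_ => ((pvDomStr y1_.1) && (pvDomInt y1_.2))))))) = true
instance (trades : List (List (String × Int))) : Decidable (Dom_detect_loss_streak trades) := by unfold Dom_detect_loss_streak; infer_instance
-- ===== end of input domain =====

-- B replaces A's backward scan with early break by a forward pass recording the last winning
-- index and returning len - 1 - last_win arithmetically (objective: alternative decomposition).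

-- ===== PORT A =====
-- 'for trade in reversed(trades): if trade['pnl'] <= 0: streak += 1 else: break; return streak'
-- trade['pnl'] is a dict lookup (first match in the association list); a missing key raises
-- KeyError in Python and is excluded by Pre_; the port defaults to 0 there (unclaimed inputs).
def lossStreakLoop : List (List (String × Int)) → Int → Int
  | [], streak => streak
  | t :: ts, streak =>
      if (List.lookup "pnl" t).getD 0 ≤ 0 then lossStreakLoop ts (streak + 1) else streak

def detect_loss_streak (trades : List (List (String × Int))) : Int :=
  lossStreakLoop trades.reverse 0

-- ===== PORT B =====
def detect_loss_streak_alt (trades : List (List (String × Int))) : Int :=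
  let last_win := (PySem.List.enumerate trades).foldl
    (fun lw p => if (List.lookup "pnl" p.2).getD 0 > 0 then p.1 else lw) (-1)
  (trades.length : Int) - 1 - last_win

-- ===== PRECONDITION & SPEC =====
-- Pre_ excludes trade lists in which some trade lacks the 'pnl' key: B's Python (which visits
-- every trade) raises KeyError there, and A's Python raises too whenever its backward scan
-- reaches such a trade (A returns only when an earlier winner hides the malformed trade).
def Pre_detect_loss_streak (trades : List (List (String × Int))) : Prop :=
  ∀ t ∈ trades, "pnl" ∈ t.map Prod.fst
instance (trades : List (List (String × Int))) : Decidable (Pre_detect_loss_streak trades) := by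
  unfold Pre_detect_loss_streak; infer_instance

def pvWitness_detect_loss_streak : (List (List (String × Int))) :=
  [[("pnl", 3)], [("pnl", -1)], [("pnl", 0)]]

def Spec_detect_loss_streak (trades : List (List (String × Int))) (out : Int) : Prop := out = detect_loss_streak_alt trades
instance (trades : List (List (String × Int))) (out : Int) : Decidable (Spec_detect_loss_streak trades out) := by unfold Spec_detect_loss_streak; infer_instance

-- ===== CLAIM (what is proved, stated in full; the proofs are below) =====
def Claim_equal_detect_loss_streak : Prop := ∀ (trades : List (List (String × Int))), Dom_detect_loss_streak trades → Pre_detect_loss_streak trades → Spec_detect_loss_streak trades (detect_loss_streak trades)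

-- ===== LEMMAS AND PROOFS =====

theorem lossStreakLoop_add (rs : List (List (String × Int))) (s : Int) :
    lossStreakLoop rs s = s + lossStreakLoop rs 0 := by
  induction rs generalizing s with
  | nil => simp [lossStreakLoop]
  | cons t ts ih =>
      simp only [lossStreakLoop]
      split
      · rw [ih (s + 1), ih (0 + 1)]; ring
      · ring

theorem detect_eq_alt (trades : List (List (String × Int))) :
    detect_loss_streak trades = detect_loss_streak_alt trades := by
  induction trades using List.reverseRecOn with
  | nil => decide
  | append_singleton ts t ih =>
      simp only [detect_loss_streak, detect_loss_streak_alt, List.reverse_append,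
        List.reverse_singleton, List.singleton_append, lossStreakLoop,
        PySem.List.enumerate_append, List.foldl_append, PySem.List.enumerate,
        List.foldl_cons, List.foldl_nil, List.length_append, List.length_singleton] at *
      by_cases h : (List.lookup "pnl" t).getD 0 ≤ 0
      · rw [if_pos h, if_neg (by omega), lossStreakLoop_add, ih]
        push_cast; ring
      · rw [if_neg h, if_pos (by omega)]
        push_cast; ring

-- ===== VERDICT (by name: the statement is the Claim_ definition above) =====
theorem detect_loss_streak_spec : Claim_equal_detect_loss_streak := by
  intro trades _ _
  exact detect_eq_alt trades
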